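-- pv_equiv track=rewrite | github.com/pj-000/pptagent | agents/planner.py | _consume_json_string
-- ===== SOURCE A (Python) =====
-- def _consume_json_string(text: str, start: int) -> int:
--     i = start + 1
--     escape = False
--
--     while i < len(text):
--         ch = text[i]
--         if escape:
--             escape = False
--             i += 1
--             continue
--         if ch == "\\":
--             escape = True
--             i += 1
--             continue
--         if ch == '"':
--             return i + 1
--         i += 1
--
--     return len(text)
-- ===== SOURCE B (Python) =====
-- def _consume_json_string(text: str, start: int) -> int:
--     n = len(text)
--     i = start + 1
--     while True:
--         q = text.find('"', i)
--         b = text.find('\\', i)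
--         if q == -1:
--             return n
--         if b == -1 or q < b:
--             return q + 1
--         i = b + 2
-- ===== Notes on version B (the rewrite author's own statement) =====
-- stated objective: faster
-- what changed: Replaces the per-character Python loop with an escape flag by str.find-based jumping: leap directly to the next quote/backslash, return after an unescaped quote, skip two past a backslash.
-- outside the precondition, e.g. on _consume_json_string('ab"', -3): A returns 0, B returns 3
import Mathlib
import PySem

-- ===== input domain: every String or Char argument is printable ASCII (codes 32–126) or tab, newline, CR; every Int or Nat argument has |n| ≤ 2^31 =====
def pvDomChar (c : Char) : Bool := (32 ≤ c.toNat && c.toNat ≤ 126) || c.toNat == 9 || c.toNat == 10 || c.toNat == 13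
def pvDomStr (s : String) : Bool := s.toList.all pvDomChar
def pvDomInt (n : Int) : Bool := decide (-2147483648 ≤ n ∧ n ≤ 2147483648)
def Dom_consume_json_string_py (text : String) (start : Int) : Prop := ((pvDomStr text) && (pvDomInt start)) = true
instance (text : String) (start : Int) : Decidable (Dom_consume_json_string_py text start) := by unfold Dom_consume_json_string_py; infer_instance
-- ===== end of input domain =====

-- B replaces A's per-character loop with an escape flag by str.find-based jumping to the
-- next quote/backslash (idiomatic; return value only, no side effects).


-- ===== PORT A =====
-- the while loop of A: i, escape are the loop state; text[i] is PySem.List.pyGet? (exact,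
-- incl. negative indices); the 'none' (IndexError) case is unreachable under Pre_.
def consumeAuxA (cs : List Char) (i : Int) (escape : Bool) : Int :=
  if i < (cs.length : Int) then
    match PySem.List.pyGet? cs i with
    | some ch =>
      if escape then consumeAuxA cs (i + 1) false
      else if ch = '\\' then consumeAuxA cs (i + 1) true
      else if ch = '"' then i + 1
      else consumeAuxA cs (i + 1) escape
    | none => 0   -- Python raises IndexError here (only when i < -len(text)); excluded by Pre_
  else (cs.length : Int)
termination_by ((cs.length : Int) - i).toNat
decreasing_by all_goals (simp_wf; omega)

def consume_json_string_py (text : String) (start : Int) : Int :=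
  consumeAuxA text.toList (start + 1) false

-- ===== PORT B =====
-- termination facts for the B loop, needed by the port itself (cited in decreasing_by)
theorem findFrom_char_bounds (s : List Char) (c : Char) (i : Int)
    (h : PySem.Chars.findFrom s [c] i ≠ -1) :
    i ≤ PySem.Chars.findFrom s [c] i ∧ 0 ≤ PySem.Chars.findFrom s [c] i ∧
      PySem.Chars.findFrom s [c] i < (s.length : Int) := by
  simp only [PySem.Chars.findFrom, Int.toNat_natCast, List.take_length] at h ⊢
  set st := (if i < 0 then if i + (s.length : Int) < 0 then 0 else i + (s.length : Int) else i) with hst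
  have hst1 : 0 ≤ st ∧ i ≤ st := by rw [hst]; split_ifs <;> omega
  split_ifs at h ⊢ with h1 h2
  · exact absurd rfl h
  · exact absurd rfl h
  · have hr0 : 0 ≤ PySem.Chars.find (List.drop st.toNat s) [c] := by
      have := PySem.Chars.neg_one_le_find (List.drop st.toNat s) [c]
      omega
    have hspec := (PySem.Chars.find_spec (show 0 ≤ PySem.Chars.find (List.drop st.toNat s) [c] from hr0)).1
    have hlen := hspec.length_le
    simp [List.length_drop] at hlen
    omega

-- the while loop of B: text.find(sub, i) is PySem.Str.findFrom (exact)
def consumeAuxB (text : String) (i : Int) : Int :=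
  let q := PySem.Str.findFrom text "\"" i
  let b := PySem.Str.findFrom text "\\" i
  if q = -1 then (text.toList.length : Int)
  else if b = -1 ∨ q < b then q + 1
  else consumeAuxB text (b + 2)
termination_by ((text.toList.length : Int) + 2 - i).toNat
decreasing_by
  rename_i hq hnb
  rw [not_or] at hnb
  have h1 := findFrom_char_bounds text.toList '"' i (by simpa using hq)
  have h2 := findFrom_char_bounds text.toList '\\' i (by simpa using hnb.1)
  simp_wf
  simp only [String.length_toList] at *
  omega

def consume_json_string_py_alt (text : String) (start : Int) : Int :=
  consumeAuxB text (start + 1)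

-- ===== PRECONDITION & SPEC =====
-- Pre_ restricts start to the natural domain start ≥ -1 (the scan begins at start+1 ≥ 0):
-- for start+1 < -len(text) (text nonempty) A raises IndexError, and on the remaining
-- negative starts A's value comes from Python's negative-index wraparound, an artefact of
-- A's per-character indexing that no caller relies on (A is always called with start ≥ 0).
def Pre_consume_json_string_py (text : String) (start : Int) : Prop := -1 ≤ start
instance (text : String) (start : Int) : Decidable (Pre_consume_json_string_py text start) := by
  unfold Pre_consume_json_string_py; infer_instance

def pvWitness_consume_json_string_py : String × Int := ("\"hi\" : 1", 0)

def Spec_consume_json_string_py (text : String) (start : Int) (out : Int) : Prop := out = consume_json_string_py_alt text start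
instance (text : String) (start : Int) (out : Int) : Decidable (Spec_consume_json_string_py text start out) := by unfold Spec_consume_json_string_py; infer_instance

-- ===== CLAIM (what is proved, stated in full; the proofs are below) =====
def Claim_equal_consume_json_string_py : Prop := ∀ (text : String) (start : Int), Dom_consume_json_string_py text start → Pre_consume_json_string_py text start → Spec_consume_json_string_py text start (consume_json_string_py text start)

-- ===== LEMMAS AND PROOFS =====

-- [c] is an infix iff c is a member
theorem singleton_infix_iff (c : Char) (l : List Char) : [c] <:+: l ↔ c ∈ l := by
  constructor
  · intro h; exact h.mem (List.mem_singleton_self c)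
  · intro h; obtain ⟨x, y, rfl⟩ := List.append_of_mem h; exact ⟨x, y, by simp⟩

-- [c] is a prefix of the drop iff the character at that position is c
theorem singleton_prefix_drop_iff (c : Char) (l : List Char) (j : Nat) :
    [c] <+: l.drop j ↔ l[j]? = some c := by
  rw [← List.head?_drop]
  cases l.drop j <;> simp [List.cons_prefix_cons, eq_comm]

-- find from a start index past the end yields -1
theorem findFrom_gt (s sub : List Char) (i : Int) (h : (s.length : Int) < i) :
    PySem.Chars.findFrom s sub i = -1 := by
  simp only [PySem.Chars.findFrom]
  split_ifs with h1 h2 <;> try rfl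
  all_goals omega

-- characterisation of findFrom for a single-character needle, start ≥ 0
theorem findFrom_char_eq_neg_one (s : List Char) (c : Char) (i : Int) (h0 : 0 ≤ i)
    (h : PySem.Chars.findFrom s [c] i = -1) :
    ∀ j : Nat, i.toNat ≤ j → j < s.length → s[j]? ≠ some c := by
  intro j hij hj hc
  rcases le_or_gt i (s.length : Int) with hle | hgt
  · rw [← Int.toNat_of_nonneg h0] at h
    rw [PySem.Chars.findFrom_natCast_eq_neg_one_iff s [c] i.toNat (by omega)] at h
    apply h
    rw [singleton_infix_iff]
    have : (s.drop i.toNat)[j - i.toNat]? = some c := by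
      rw [List.getElem?_drop]
      rwa [show i.toNat + (j - i.toNat) = j by omega]
    exact List.mem_of_getElem? this
  · omega

theorem findFrom_char_spec (s : List Char) (c : Char) (i : Int) (h0 : 0 ≤ i)
    (h : PySem.Chars.findFrom s [c] i ≠ -1) :
    s[(PySem.Chars.findFrom s [c] i).toNat]? = some c ∧
      ∀ j : Nat, i.toNat ≤ j → j < (PySem.Chars.findFrom s [c] i).toNat → s[j]? ≠ some c := by
  rcases le_or_gt i (s.length : Int) with hle | hgt
  · rw [← Int.toNat_of_nonneg h0] at h ⊢
    have hs := PySem.Chars.findFrom_natCast_spec s [c] i.toNat (by omega) h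
    refine ⟨(singleton_prefix_drop_iff c s _).mp hs.2.1, ?_⟩
    intro j hij hj hc
    exact hs.2.2 j hij hj ((singleton_prefix_drop_iff c s j).mpr hc)
  · exact absurd (findFrom_gt s [c] i hgt) h

-- A's loop reaches the end when no quote remains
theorem consumeAuxA_no_quote_aux (cs : List Char) (m : Nat) :
    ∀ (i : Int) (e : Bool), ((cs.length : Int) - i).toNat ≤ m → 0 ≤ i →
    (∀ j : Nat, i.toNat ≤ j → j < cs.length → cs[j]? ≠ some '"') →
    consumeAuxA cs i e = (cs.length : Int) := by
  induction m with
  | zero =>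
    intro i e hm h0 h
    rw [consumeAuxA, if_neg (by omega)]
  | succ m ih =>
    intro i e hm h0 h
    rw [consumeAuxA]
    by_cases hlt : i < (cs.length : Int)
    · rw [if_pos hlt]
      have hi : i.toNat < cs.length := by omega
      have hget := PySem.List.pyGet?_eq_some_getElem cs h0 hlt
      have hnext : ∀ j : Nat, (i + 1).toNat ≤ j → j < cs.length → cs[j]? ≠ some '"' := by
        intro j hj hjl; exact h j (by omega) hjl
      split
      · rename_i ch hch
        rw [hget] at hch
        have hchv : ch = cs[i.toNat] := (Option.some.inj hch).symm
        have hq : ¬ ch = '"' := by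
          intro he
          exact h i.toNat le_rfl hi (by rw [List.getElem?_eq_getElem hi, ← hchv, he])
        by_cases he : e = true
        · rw [if_pos he]
          exact ih (i + 1) false (by omega) (by omega) hnext
        · rw [if_neg he]
          by_cases hb : ch = '\\'
          · rw [if_pos hb]
            exact ih (i + 1) true (by omega) (by omega) hnext
          · rw [if_neg hb, if_neg hq]
            exact ih (i + 1) e (by omega) (by omega) hnext
      · rename_i hch
        rw [hget] at hch
        exact absurd hch (by simp)
    · rw [if_neg hlt]

-- A's loop walks unchanged over a segment containing no quote and no backslash
theorem consumeAuxA_skip_aux (cs : List Char) (k : Int) (m : Nat) :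
    ∀ i : Int, (k - i).toNat ≤ m → 0 ≤ i → i ≤ k → k ≤ (cs.length : Int) →
    (∀ j : Nat, i.toNat ≤ j → j < k.toNat → cs[j]? ≠ some '"' ∧ cs[j]? ≠ some '\\') →
    consumeAuxA cs i false = consumeAuxA cs k false := by
  induction m with
  | zero =>
    intro i hm h0 hik hk h
    have : i = k := by omega
    rw [this]
  | succ m ih =>
    intro i hm h0 hik hk h
    rcases eq_or_lt_of_le hik with heq | hlt
    · rw [heq]
    · conv_lhs => rw [consumeAuxA]
      rw [if_pos (by omega)]
      have hi : i.toNat < cs.length := by omega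
      have hget := PySem.List.pyGet?_eq_some_getElem cs h0 (show i < (cs.length : Int) by omega)
      have hij := h i.toNat le_rfl (by omega)
      rw [List.getElem?_eq_getElem hi] at hij
      split
      · rename_i ch hch
        rw [hget] at hch
        have hchv : ch = cs[i.toNat] := (Option.some.inj hch).symm
        have h1 : ¬ ch = '\\' := by intro he; exact hij.2 (by rw [← hchv, he])
        have h2 : ¬ ch = '"' := by intro he; exact hij.1 (by rw [← hchv, he])
        rw [if_neg (by simp), if_neg h1, if_neg h2]
        exact ih (i + 1) (by omega) (by omega) (by omega) hk
          (fun j hj hjl => h j (by omega) hjl)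
      · rename_i hch
        rw [hget] at hch
        exact absurd hch (by simp)

-- the escape flag consumes exactly one character
theorem consumeAuxA_escape (cs : List Char) (i : Int) (h0 : 0 ≤ i) :
    consumeAuxA cs i true = consumeAuxA cs (i + 1) false := by
  rw [consumeAuxA]
  by_cases hlt : i < (cs.length : Int)
  · rw [if_pos hlt]
    have hget := PySem.List.pyGet?_eq_some_getElem cs h0 hlt
    split
    · rw [if_pos rfl]
    · rename_i hch
      rw [hget] at hch
      exact absurd hch (by simp)
  · rw [if_neg hlt, consumeAuxA, if_neg (by omega)]

theorem main_equiv_aux (text : String) (m : Nat) :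
    ∀ i : Int, ((text.toList.length : Int) + 2 - i).toNat ≤ m → 0 ≤ i →
    consumeAuxA text.toList i false = consumeAuxB text i := by
  induction m with
  | zero =>
    intro i hm h0
    rw [consumeAuxA, if_neg (by omega), consumeAuxB]
    simp only [PySem.Str.findFrom_eq]
    rw [show ("\"" : String).toList = ['"'] from rfl]
    rw [findFrom_gt text.toList ['"'] i (by omega)]
    rw [if_pos rfl]
  | succ m ih =>
    intro i hm h0
    rw [consumeAuxB]
    simp only [PySem.Str.findFrom_eq]
    rw [show ("\"" : String).toList = ['"'] from rfl,
        show ("\\" : String).toList = ['\\'] from rfl]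
    split_ifs with hq hor
    · -- no quote at all: A scans to the end
      exact consumeAuxA_no_quote_aux text.toList (text.toList.length - i.toNat) i false
        (by omega) h0 (findFrom_char_eq_neg_one text.toList '"' i h0 hq)
    · -- next special character is the quote: A walks to it and returns q + 1
      have hqs := findFrom_char_spec text.toList '"' i h0 hq
      have hqb := findFrom_char_bounds text.toList '"' i hq
      have hnb : ∀ j : Nat, i.toNat ≤ j →
          j < (PySem.Chars.findFrom text.toList ['"'] i).toNat →
          text.toList[j]? ≠ some '\\' := by
        rcases hor with hbn | hlt
        · intro j hj hjl hc
          exact findFrom_char_eq_neg_one text.toList '\\' i h0 hbn j hj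
            (by have := List.getElem?_eq_some_iff.mp hc; omega) hc
        · have hbne : PySem.Chars.findFrom text.toList ['\\'] i ≠ -1 := by
            intro he; rw [he] at hlt; omega
          have hbb := findFrom_char_bounds text.toList '\\' i hbne
          intro j hj hjl
          exact (findFrom_char_spec text.toList '\\' i h0 hbne).2 j hj (by omega)
      have hskip := consumeAuxA_skip_aux text.toList (PySem.Chars.findFrom text.toList ['"'] i)
        ((PySem.Chars.findFrom text.toList ['"'] i).toNat - i.toNat) i (by omega) h0 (by omega)
        (by omega) (fun j hj hjl => ⟨hqs.2 j hj hjl, hnb j hj hjl⟩)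
      rw [hskip, consumeAuxA, if_pos (by omega)]
      have hget := PySem.List.pyGet?_eq_some_getElem text.toList
        (show (0:Int) ≤ PySem.Chars.findFrom text.toList ['"'] i by omega) (by omega)
      have hqc := hqs.1
      rw [List.getElem?_eq_getElem (by omega)] at hqc
      rw [Option.some.inj hqc] at hget
      rw [hget]
      rfl
    · -- next special character is a backslash: A consumes it and the escaped one
      have hb2 : PySem.Chars.findFrom text.toList ['\\'] i ≠ -1 := fun he => hor (Or.inl he)
      have hbq := fun hl => hor (Or.inr hl)
      have hbs := findFrom_char_spec text.toList '\\' i h0 hb2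
      have hbb := findFrom_char_bounds text.toList '\\' i hb2
      have hqs := findFrom_char_spec text.toList '"' i h0 hq
      have hqb := findFrom_char_bounds text.toList '"' i hq
      have hqgeb : ¬ PySem.Chars.findFrom text.toList ['"'] i <
          PySem.Chars.findFrom text.toList ['\\'] i := hbq
      have hskip := consumeAuxA_skip_aux text.toList (PySem.Chars.findFrom text.toList ['\\'] i)
        ((PySem.Chars.findFrom text.toList ['\\'] i).toNat - i.toNat) i (by omega) h0 (by omega)
        (by omega) (fun j hj hjl => ⟨hqs.2 j hj (by omega), hbs.2 j hj hjl⟩)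
      rw [hskip, consumeAuxA, if_pos (by omega)]
      have hget := PySem.List.pyGet?_eq_some_getElem text.toList
        (show (0:Int) ≤ PySem.Chars.findFrom text.toList ['\\'] i by omega) (by omega)
      have hbc := hbs.1
      rw [List.getElem?_eq_getElem (by omega)] at hbc
      rw [Option.some.inj hbc] at hget
      rw [hget]
      have hmid : consumeAuxA text.toList (PySem.Chars.findFrom text.toList ['\\'] i + 1) true =
          consumeAuxB text (PySem.Chars.findFrom text.toList ['\\'] i + 2) := by
        rw [consumeAuxA_escape text.toList (PySem.Chars.findFrom text.toList ['\\'] i + 1) (by omega)]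
        rw [show PySem.Chars.findFrom text.toList ['\\'] i + 1 + 1 =
            PySem.Chars.findFrom text.toList ['\\'] i + 2 by ring]
        exact ih (PySem.Chars.findFrom text.toList ['\\'] i + 2) (by omega) (by omega)
      exact hmid

-- ===== VERDICT (by name: the statement is the Claim_ definition above) =====
theorem consume_json_string_py_spec : Claim_equal_consume_json_string_py := by
  intro text start _ hpre
  unfold Spec_consume_json_string_py consume_json_string_py consume_json_string_py_alt
  unfold Pre_consume_json_string_py at hpre
  exact main_equiv_aux text ((text.toList.length : Int) + 2 - (start + 1)).toNat (start + 1)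
    le_rfl (by omega)
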